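-- pv_equiv track=rewrite | github.com/HamoudaBenAbdennebi/revision-bac-prog | prototype.py | genere
-- ===== SOURCE A (Python) =====
-- def genere(nb):
--     mot=""
--     while not( nb == 0 ):
--         r = nb % 3
--         if r == 0:
--             y="Ma"
--         elif r == 1:
--             y="Des"
--         else:
--             y="Son"
--         mot = y+mot
--         nb = nb // 3
--     return mot
-- ===== SOURCE B (Python) =====
-- def genere(nb):
--     if nb == 0:
--         return ""
--     words = ("Ma", "Des", "Son")
--     p = 1
--     while p * 3 <= nb:
--         p *= 3
--     parts = []
--     while p >= 1:
--         parts.append(words[nb // p % 3])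
--         p //= 3
--     return "".join(parts)
-- ===== Notes on version B (the rewrite author's own statement) =====
-- stated objective: alternative
-- what changed: Instead of A's LSB-first loop that prepends each digit word to a mutable string, B first finds the highest power of 3 not exceeding nb, then emits digit words most-significant-first with nb // p % 3 and joins them once.
import Mathlib
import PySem

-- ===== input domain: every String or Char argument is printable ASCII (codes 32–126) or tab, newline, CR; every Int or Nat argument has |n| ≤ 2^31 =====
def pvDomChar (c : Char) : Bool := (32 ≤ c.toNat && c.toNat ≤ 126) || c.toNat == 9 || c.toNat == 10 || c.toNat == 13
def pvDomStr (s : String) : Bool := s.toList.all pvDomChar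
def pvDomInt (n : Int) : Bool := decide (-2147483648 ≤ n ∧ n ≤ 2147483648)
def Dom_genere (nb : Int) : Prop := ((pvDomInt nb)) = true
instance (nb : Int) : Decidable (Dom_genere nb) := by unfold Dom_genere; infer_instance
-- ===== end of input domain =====

-- B replaces A's LSB-first loop with string prepends by an MSB-first emission:
-- it finds the highest power of 3 ≤ nb, then reads each digit with nb // p % 3
-- and joins the words once; objective: alternative (return value only).

-- ===== PORT A =====
-- A's while loop; the 'nb < 0' guard only makes the recursion total (Python loops
-- forever there, excluded by Pre_genere).
def genereGo (nb : Int) (mot : String) : String :=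
  if nb == 0 then mot
  else if nb < 0 then mot
  else
    let r := PySem.Int.mod nb 3
    let y := if r == 0 then "Ma" else if r == 1 then "Des" else "Son"
    genereGo (PySem.Int.floordiv nb 3) (y ++ mot)
termination_by nb.toNat
decreasing_by
  simp only [beq_iff_eq, not_lt] at *
  rw [PySem.Int.floordiv_eq_ediv_of_pos (a := nb) (by omega : (0:Int) < 3)]
  omega

def genere (nb : Int) : String := genereGo nb ""

-- ===== PORT B =====
-- Source B's first loop: grow p while p * 3 ≤ nb (the '1 ≤ p' guard only makes it total;
-- it always holds at the call site).
def alt_pow (nb p : Int) : Int :=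
  if 1 ≤ p ∧ p * 3 ≤ nb then alt_pow nb (p * 3) else p
termination_by (nb - p).toNat
decreasing_by omega

-- Source B's second loop: emit words[nb // p % 3] for p, p // 3, …, 1.
def alt_emit (nb p : Int) : List String :=
  if 1 ≤ p then
    ((PySem.List.pyGet? ["Ma", "Des", "Son"]
        (PySem.Int.mod (PySem.Int.floordiv nb p) 3)).getD "")
      :: alt_emit nb (PySem.Int.floordiv p 3)
  else []
termination_by p.toNat
decreasing_by
  rename_i h
  rw [PySem.Int.floordiv_eq_ediv_of_pos (a := p) (by omega : (0:Int) < 3)]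
  omega

def genere_alt (nb : Int) : String :=
  if nb == 0 then "" else String.join (alt_emit nb (alt_pow nb 1))

-- ===== PRECONDITION & SPEC =====
-- Pre_ excludes negative nb, on which A's while loop never terminates
-- (Python A returns on no negative input).
def Pre_genere (nb : Int) : Prop := 0 ≤ nb
instance (nb : Int) : Decidable (Pre_genere nb) := by unfold Pre_genere; infer_instance
def pvWitness_genere : Int := (7)

def Spec_genere (nb : Int) (out : String) : Prop := out = genere_alt nb
instance (nb : Int) (out : String) : Decidable (Spec_genere nb out) := by unfold Spec_genere; infer_instance

-- ===== CLAIM (what is proved, stated in full; the proofs are below) =====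
def Claim_equal_genere : Prop := ∀ (nb : Int), Dom_genere nb → Pre_genere nb → Spec_genere nb (genere nb)

-- ===== LEMMAS AND PROOFS =====

-- The base-3 digit-word string, MSB first, no leading zero-digit words: the common
-- characterisation both ports are proved equal to.
def digitsStr (nb : Int) : String :=
  if _h : 0 < nb then digitsStr (nb / 3) ++
    (if nb % 3 = 0 then "Ma" else if nb % 3 = 1 then "Des" else "Son")
  else ""
termination_by nb.toNat
decreasing_by omega

theorem digitsStr_nonpos {nb : Int} (h : ¬ 0 < nb) : digitsStr nb = "" := by
  rw [digitsStr]; simp [h]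

theorem digitsStr_pos {nb : Int} (h : 0 < nb) : digitsStr nb = digitsStr (nb / 3) ++
    (if nb % 3 = 0 then "Ma" else if nb % 3 = 1 then "Des" else "Son") := by
  rw [digitsStr]; simp [h]

theorem alt_emit_pos (x p : Int) (h : 1 ≤ p) : alt_emit x p =
    ((PySem.List.pyGet? ["Ma", "Des", "Son"]
        (PySem.Int.mod (PySem.Int.floordiv x p) 3)).getD "")
      :: alt_emit x (PySem.Int.floordiv p 3) := by
  rw [alt_emit, if_pos h]

theorem alt_emit_zero (x : Int) : alt_emit x 0 = [] := by
  rw [alt_emit]; norm_num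

theorem foldl_append_init (b : List String) : ∀ s : String,
    List.foldl (· ++ ·) s b = s ++ List.foldl (· ++ ·) "" b := by
  induction b with
  | nil => intro s; simp
  | cons x xs ih =>
    intro s
    simp only [List.foldl]
    rw [ih (s ++ x), ih ("" ++ x)]
    simp [String.append_assoc]

theorem join_append (a b : List String) :
    String.join (a ++ b) = String.join a ++ String.join b := by
  simp only [String.join, List.foldl_append]
  rw [foldl_append_init b]

-- A's loop accumulates digitsStr on the left of its accumulator.
theorem genereGo_eq (n : Nat) (nb : Int) (hn : nb.toNat = n) (h : 0 ≤ nb) (mot : String) :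
    genereGo nb mot = digitsStr nb ++ mot := by
  induction n using Nat.strong_induction_on generalizing nb mot with
  | _ n ih =>
    rw [genereGo.eq_def]
    by_cases h0 : nb = 0
    · simp [h0, digitsStr_nonpos (by omega : ¬ (0:Int) < 0)]
    · have hpos : 0 < nb := by omega
      have hq := PySem.Int.floordiv_eq_ediv_of_pos (a := nb) (by omega : (0:Int) < 3)
      have hm := PySem.Int.mod_eq_emod_of_pos (a := nb) (by omega : (0:Int) < 3)
      have hqlt : (PySem.Int.floordiv nb 3).toNat < n := by rw [hq]; omega
      have hq0 : 0 ≤ PySem.Int.floordiv nb 3 := by rw [hq]; omega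
      simp only [beq_iff_eq, if_neg h0, if_neg (show ¬ nb < 0 by omega)]
      rw [ih _ hqlt _ rfl hq0, digitsStr_pos hpos, hq, hm]
      have h3 : nb % 3 = 0 ∨ nb % 3 = 1 ∨ nb % 3 = 2 := by omega
      rcases h3 with h3 | h3 | h3 <;> simp [h3, String.append_assoc]

-- alt_pow returns a power of 3 bracketing nb (for 1 ≤ nb).
theorem alt_pow_spec (m : Nat) (nb p : Int) (hm : (nb - p).toNat = m) (j : Nat)
    (hp : p = (3:Int) ^ j) (hle : p ≤ nb) :
    ∃ k, alt_pow nb p = (3:Int) ^ k ∧ (3:Int) ^ k ≤ nb ∧ nb < (3:Int) ^ (k + 1) := by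
  induction m using Nat.strong_induction_on generalizing p j with
  | _ m ih =>
    have hp1 : 1 ≤ p := by
      have := pow_pos (show (0:Int) < 3 by norm_num) j
      omega
    rw [alt_pow]
    by_cases hc : p * 3 ≤ nb
    · have hlt : (nb - p * 3).toNat < m := by omega
      have hp' : p * 3 = (3:Int) ^ (j + 1) := by rw [hp]; ring
      rw [if_pos ⟨hp1, hc⟩]
      exact ih _ hlt (p * 3) rfl (j + 1) hp' hc
    · refine ⟨j, ?_, by omega, ?_⟩
      · rw [if_neg (fun h => hc h.2)]; exact hp
      · have : (3:Int) ^ (j + 1) = p * 3 := by rw [hp]; ring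
        omega

-- shifting the power: MSB-first emission peels the last digit.
theorem alt_emit_shift (k : Nat) (nb : Int) (h : 0 ≤ nb) :
    alt_emit nb ((3:Int) ^ (k + 1)) = alt_emit (nb / 3) ((3:Int) ^ k) ++
      [((PySem.List.pyGet? ["Ma", "Des", "Son"] (PySem.Int.mod nb 3)).getD "")] := by
  induction k generalizing nb with
  | zero =>
    have hf1 : ∀ x : Int, PySem.Int.floordiv x 1 = x := fun x => by
      rw [PySem.Int.floordiv_eq_ediv_of_pos (by omega : (0:Int) < 1)]; omega
    have hf13 : PySem.Int.floordiv 1 3 = (0:Int) := by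
      rw [PySem.Int.floordiv_eq_ediv_of_pos (by omega : (0:Int) < 3)]; norm_num
    have hf33 : PySem.Int.floordiv 3 3 = (1:Int) := by
      rw [PySem.Int.floordiv_eq_ediv_of_pos (by omega : (0:Int) < 3)]; norm_num
    have hfnb : PySem.Int.floordiv nb 3 = nb / 3 := by
      rw [PySem.Int.floordiv_eq_ediv_of_pos (by omega : (0:Int) < 3)]
    rw [pow_one, pow_zero,
        alt_emit_pos nb 3 (by norm_num), hf33,
        alt_emit_pos nb 1 le_rfl, hf1, hf13, alt_emit_zero,
        alt_emit_pos (nb / 3) 1 le_rfl, hf1 (nb / 3), hf13, alt_emit_zero, hfnb]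
    simp
  | succ k ih =>
    have h2p : (0:Int) < 3 ^ (k + 2) := by positivity
    have h1p : (0:Int) < 3 ^ (k + 1) := by positivity
    have hd : PySem.Int.floordiv ((3:Int) ^ (k + 2)) 3 = (3:Int) ^ (k + 1) := by
      rw [PySem.Int.floordiv_eq_ediv_of_pos (by omega : (0:Int) < 3), pow_succ,
          Int.mul_ediv_cancel _ (by omega)]
    have hd' : PySem.Int.floordiv ((3:Int) ^ (k + 1)) 3 = (3:Int) ^ k := by
      rw [PySem.Int.floordiv_eq_ediv_of_pos (by omega : (0:Int) < 3), pow_succ,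
          Int.mul_ediv_cancel _ (by omega)]
    have hq : PySem.Int.floordiv nb ((3:Int) ^ (k + 2)) =
        PySem.Int.floordiv (nb / 3) ((3:Int) ^ (k + 1)) := by
      rw [PySem.Int.floordiv_eq_ediv_of_pos h2p, PySem.Int.floordiv_eq_ediv_of_pos h1p,
          show ((3:Int)) ^ (k + 2) = 3 * 3 ^ (k + 1) by ring]
      rw [Int.ediv_ediv_of_nonneg (show (0:Int) ≤ 3 by norm_num)]
    rw [alt_emit_pos nb ((3:Int) ^ (k + 2)) (by omega), hd, hq, ih nb h,
        alt_emit_pos (nb / 3) ((3:Int) ^ (k + 1)) (by omega), hd']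
    simp

-- joining the MSB-first emission at the correct power gives digitsStr.
theorem alt_emit_join (k : Nat) : ∀ (nb : Int), (3:Int) ^ k ≤ nb → nb < (3:Int) ^ (k + 1) →
    String.join (alt_emit nb ((3:Int) ^ k)) = digitsStr nb := by
  induction k with
  | zero =>
    intro nb h1 h2
    have hnb : nb = 1 ∨ nb = 2 := by norm_num at h1 h2; omega
    have hf1 : PySem.Int.floordiv nb 1 = nb := by
      rw [PySem.Int.floordiv_eq_ediv_of_pos (by omega : (0:Int) < 1)]; omega
    have hf13 : PySem.Int.floordiv 1 3 = (0:Int) := by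
      rw [PySem.Int.floordiv_eq_ediv_of_pos (by omega : (0:Int) < 3)]; norm_num
    rw [pow_zero, alt_emit_pos nb 1 le_rfl, hf1, hf13, alt_emit_zero]
    rcases hnb with h | h <;> subst h <;>
      simp [String.join, PySem.Int.mod, PySem.List.pyGet?, PySem.List.pyIdx?,
            digitsStr_pos (by omega : (0:Int) < 1), digitsStr_pos (by omega : (0:Int) < 2),
            digitsStr_nonpos (by omega : ¬ (0:Int) < 0)]
  | succ k ih =>
    intro nb h1 h2
    have h0 : 0 ≤ nb := le_trans (by positivity) h1
    rw [alt_emit_shift k nb h0, join_append]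
    have hq1 : (3:Int) ^ k ≤ nb / 3 := by
      have h : (3:Int) ^ (k + 1) = 3 ^ k * 3 := by ring
      omega
    have hq2 : nb / 3 < (3:Int) ^ (k + 1) := by
      have h : (3:Int) ^ (k + 2) = 3 ^ (k + 1) * 3 := by ring
      omega
    have hpos : 0 < nb := lt_of_lt_of_le (by positivity) h1
    rw [ih (nb / 3) hq1 hq2, digitsStr_pos hpos]
    have hm : PySem.Int.mod nb 3 = nb % 3 :=
      PySem.Int.mod_eq_emod_of_pos (by omega : (0:Int) < 3)
    have h3 : nb % 3 = 0 ∨ nb % 3 = 1 ∨ nb % 3 = 2 := by omega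
    rw [hm]
    rcases h3 with h3 | h3 | h3 <;>
      simp [h3, String.join, PySem.List.pyGet?, PySem.List.pyIdx?]

theorem genere_alt_eq (nb : Int) (h : 0 ≤ nb) : genere_alt nb = digitsStr nb := by
  unfold genere_alt
  by_cases h0 : nb = 0
  · simp [h0, digitsStr_nonpos (by omega : ¬ (0:Int) < 0)]
  · have h1 : 1 ≤ nb := by omega
    obtain ⟨k, hk, hle, hlt⟩ :=
      alt_pow_spec (nb - 1).toNat nb 1 rfl 0 (by norm_num) h1
    simp only [beq_iff_eq, if_neg h0]
    rw [hk, alt_emit_join k nb hle hlt]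

-- ===== VERDICT (by name: the statement is the Claim_ definition above) =====
theorem genere_spec : Claim_equal_genere := by
  intro nb _ hpre
  unfold Spec_genere genere
  rw [genere_alt_eq nb hpre, genereGo_eq nb.toNat nb rfl hpre ""]
  simp
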